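-- pv_equiv track=rewrite | github.com/das-ash/bookbot | stats.py | no_of_characters
-- ===== SOURCE A (Python) =====
-- def no_of_characters(book_content):
--     book_lcase = book_content.lower()
--     char_count = {'a': 0, 'b': 0, 'c': 0, 'd': 0, 'e': 0, 'f': 0, 'g': 0,
--                   'h': 0, 'i': 0, 'j': 0, 'k': 0, 'l': 0, 'm': 0,'n': 0,
--                   'o': 0, 'p': 0, 'q': 0, 'r': 0, 's': 0,'t': 0, 'u': 0,
--                   'v': 0, 'w': 0, 'x': 0, 'y': 0, 'z': 0 ,'-': 0, ',': 0
--                   ,'.': 0}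
--     for i in book_lcase:
--         if i in char_count:
--             char_count[i] += 1
--     return char_count
-- ===== SOURCE B (Python) =====
-- def no_of_characters(book_content):
--     # No counting dict at all: lower the text once, then make one str.count
--     # pass per key of the fixed 29-character alphabet.
--     book_lcase = book_content.lower()
--     return {ch: book_lcase.count(ch) for ch in "abcdefghijklmnopqrstuvwxyz-,."}
-- ===== Notes on version B (the rewrite author's own statement) =====
-- stated objective: faster
-- what changed: A scans the lowered text once in a Python-level loop, membership-testing each character against a pre-initialised dict and incrementing in place; B keeps no counter state at all and instead iterates over the fixed 29-key alphabet, making one str.count pass over the text per key.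
import Mathlib
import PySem

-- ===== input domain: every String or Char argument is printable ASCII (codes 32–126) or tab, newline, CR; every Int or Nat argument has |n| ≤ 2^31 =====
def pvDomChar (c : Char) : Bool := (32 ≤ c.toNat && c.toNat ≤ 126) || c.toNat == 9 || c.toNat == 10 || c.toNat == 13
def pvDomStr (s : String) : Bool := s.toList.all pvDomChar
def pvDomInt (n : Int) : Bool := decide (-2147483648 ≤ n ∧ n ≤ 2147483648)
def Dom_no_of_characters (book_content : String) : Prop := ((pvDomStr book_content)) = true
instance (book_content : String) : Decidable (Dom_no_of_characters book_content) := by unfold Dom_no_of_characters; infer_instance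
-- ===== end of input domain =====

-- B keeps no counter state: it iterates over the fixed 29-key alphabet and makes one
-- str.count pass over the lowered text per key (alternative decomposition; same return value).

-- ===== PORT A =====
-- the literal dict {'a': 0, …, '.': 0} of A
def noacInit : PySem.Dict String Int :=
  PySem.Dict.ofList [("a", 0), ("b", 0), ("c", 0), ("d", 0), ("e", 0), ("f", 0), ("g", 0),
    ("h", 0), ("i", 0), ("j", 0), ("k", 0), ("l", 0), ("m", 0), ("n", 0),
    ("o", 0), ("p", 0), ("q", 0), ("r", 0), ("s", 0), ("t", 0), ("u", 0),
    ("v", 0), ("w", 0), ("x", 0), ("y", 0), ("z", 0), ("-", 0), (",", 0), (".", 0)]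

def no_of_characters (book_content : String) : List (String × Int) :=
  let book_lcase := PySem.Str.lower book_content
  let char_count := book_lcase.toList.foldl
    (fun d i =>
      if d.contains (String.singleton i) then
        d.modify (String.singleton i) 0 (· + 1)
      else d)
    noacInit
  char_count.items

-- ===== PORT B =====
-- the fixed key string "abcdefghijklmnopqrstuvwxyz-,." iterated as characters
def noacKeys : List Char :=
  ['a', 'b', 'c', 'd', 'e', 'f', 'g', 'h', 'i', 'j', 'k', 'l', 'm', 'n',
   'o', 'p', 'q', 'r', 's', 't', 'u', 'v', 'w', 'x', 'y', 'z', '-', ',', '.']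

def no_of_characters_alt (book_content : String) : List (String × Int) :=
  let book_lcase := PySem.Str.lower book_content
  noacKeys.map (fun ch =>
    (String.singleton ch, (PySem.Str.count book_lcase (String.singleton ch) : Int)))

-- ===== PRECONDITION & SPEC =====
def Spec_no_of_characters (book_content : String) (out : List (String × Int)) : Prop := out = no_of_characters_alt book_content
instance (book_content : String) (out : List (String × Int)) : Decidable (Spec_no_of_characters book_content out) := by unfold Spec_no_of_characters; infer_instance

-- ===== CLAIM (what is proved, stated in full; the proofs are below) =====
def Claim_equal_no_of_characters : Prop := ∀ (book_content : String), Dom_no_of_characters book_content → Spec_no_of_characters book_content (no_of_characters book_content)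

-- ===== LEMMAS AND PROOFS =====

-- A's loop step
def noacStep (d : PySem.Dict String Int) (i : Char) : PySem.Dict String Int :=
  if d.contains (String.singleton i) then d.modify (String.singleton i) 0 (· + 1) else d

lemma noac_keys_fold (ls : List Char) (d : PySem.Dict String Int) :
    (ls.foldl noacStep d).keys = d.keys := by
  induction ls generalizing d with
  | nil => rfl
  | cons x t ih =>
    simp only [List.foldl_cons]
    rw [ih]
    unfold noacStep
    by_cases h : d.contains (String.singleton x) = true
    · simp [h, PySem.Dict.keys_modify, PySem.Dict.keys_insert_of_contains]
    · simp [h]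

lemma singleton_inj {a b : Char} (h : String.singleton a = String.singleton b) : a = b := by
  have := congrArg String.toList h
  simpa [String.singleton] using this

lemma noac_getD_fold (ls : List Char) (d : PySem.Dict String Int) (c : Char)
    (hc : d.contains (String.singleton c) = true) :
    (ls.foldl noacStep d).getD (String.singleton c) 0
      = d.getD (String.singleton c) 0 + ls.count c := by
  induction ls generalizing d with
  | nil => simp
  | cons x t ih =>
    simp only [List.foldl_cons]
    by_cases h : d.contains (String.singleton x) = true
    · have hstep : noacStep d x = d.modify (String.singleton x) 0 (· + 1) := by
        simp [noacStep, h]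
      rw [hstep, ih _ (by simp [PySem.Dict.contains_modify, hc]),
        PySem.Dict.getD_modify]
      by_cases hcx : c = x
      · subst hcx
        rw [if_pos rfl]
        simp
        ring
      · have hne : String.singleton c ≠ String.singleton x := fun hh => hcx (singleton_inj hh)
        rw [if_neg hne]
        simp [Ne.symm hcx]
    · have hstep : noacStep d x = d := by simp [noacStep, h]
      have hcx : c ≠ x := by
        intro hh; subst hh; rw [hc] at h; exact h rfl
      rw [hstep, ih _ hc]
      simp [Ne.symm hcx]

set_option maxRecDepth 8192 in
lemma noac_init_keys : noacInit.keys = noacKeys.map String.singleton := by decide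

set_option maxRecDepth 8192 in
lemma noac_init_contains : ∀ c ∈ noacKeys, noacInit.contains (String.singleton c) = true := by
  intro c hc
  fin_cases hc <;> rfl

set_option maxRecDepth 8192 in
lemma noac_init_getD : ∀ c ∈ noacKeys, noacInit.getD (String.singleton c) 0 = 0 := by
  intro c hc
  fin_cases hc <;> rfl

-- str.count with a single-character needle counts exactly the occurrences of that character
lemma noac_count_go_singleton (c : Char) (cs : List Char) (fuel acc : Nat)
    (h : cs.length ≤ fuel) :
    PySem.Chars.count.go [c] fuel cs acc = acc + cs.count c := by
  induction cs generalizing fuel acc with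
  | nil => cases fuel <;> simp [PySem.Chars.count.go]
  | cons x t ih =>
    cases fuel with
    | zero => simp at h
    | succ f =>
      rw [PySem.Chars.count.go]
      simp only [List.isPrefixOf, List.length_cons] at *
      by_cases hx : c = x
      · subst hx
        simp only [beq_self_eq_true, Bool.true_and]
        simp only [if_true, List.length_nil, List.drop_succ_cons, List.drop_zero, Nat.zero_add]
        rw [ih f (acc+1) (by omega)]
        simp [List.count_cons]
        omega
      · have : (c == x) = false := by simp [hx]
        simp only [this, Bool.false_and, if_false]
        rw [ih f acc (by omega)]
        simp [Ne.symm hx]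

lemma noac_count_singleton (cs : List Char) (c : Char) :
    PySem.Chars.count cs [c] = cs.count c := by
  unfold PySem.Chars.count
  simp [noac_count_go_singleton c cs cs.length 0 le_rfl]

-- ===== VERDICT (by name: the statement is the Claim_ definition above) =====
theorem no_of_characters_spec : Claim_equal_no_of_characters := by
  intro s _
  unfold Spec_no_of_characters
  rw [show no_of_characters s
      = (List.foldl noacStep noacInit (PySem.Str.lower s).toList).items from rfl,
    show no_of_characters_alt s
      = noacKeys.map (fun ch => (String.singleton ch,
          (PySem.Str.count (PySem.Str.lower s) (String.singleton ch) : Int))) from rfl]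
  set ls := (PySem.Str.lower s).toList with hls
  have hnd : (ls.foldl noacStep noacInit).keys.Nodup := by
    rw [noac_keys_fold, noac_init_keys]; decide
  rw [PySem.Dict.items_eq_map_keys _ hnd 0, noac_keys_fold, noac_init_keys,
    List.map_map]
  refine List.map_congr_left ?_
  intro c hc
  simp only [Function.comp]
  rw [noac_getD_fold ls noacInit c (noac_init_contains c hc),
    noac_init_getD c hc, PySem.Str.count_eq]
  have : (String.singleton c).toList = [c] := by simp [String.singleton]
  rw [this, ← hls, noac_count_singleton]
  simp
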